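-- pv_equiv track=rewrite | github.com/madshoffnielsen/AdventOfCode | 2018/Day14/index.py | part2
-- ===== SOURCE A (Python) =====
-- def part2(target):
--     recipes = [3, 7]
--     elf1, elf2 = 0, 1
--     target_str = str(target)
--     target_len = len(target_str)
--
--     while True:
--         # Create new recipes
--         new_score = recipes[elf1] + recipes[elf2]
--         for digit in str(new_score):
--             recipes.append(int(digit))
--
--             # Check last recipes match target
--             if len(recipes) >= target_len:
--                 if ''.join(map(str, recipes[-target_len:])) == target_str:
--                     return len(recipes) - target_len
--                 elif len(recipes) > target_len and ''.join(map(str, recipes[-target_len-1:-1])) == target_str: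
--                     return len(recipes) - target_len - 1
--
--         # Move elves
--         elf1 = (elf1 + 1 + recipes[elf1]) % len(recipes)
--         elf2 = (elf2 + 1 + recipes[elf2]) % len(recipes)
-- ===== SOURCE B (Python) =====
-- def part2(target):
--     target_str = str(target)
--     board = "37"
--     elf1, elf2 = 0, 1
--     while True:
--         # phase 1: pure generation, doubling the board, no per-digit checks
--         goal = 2 * len(board)
--         while len(board) < goal:
--             total = int(board[elf1]) + int(board[elf2])
--             board += str(total)
--             elf1 = (elf1 + 1 + int(board[elf1])) % len(board)
--             elf2 = (elf2 + 1 + int(board[elf2])) % len(board)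
--         # phase 2: one C-speed substring search over the whole board
--         idx = board.find(target_str)
--         if idx != -1:
--             return idx
-- ===== Notes on version B (the rewrite author's own statement) =====
-- stated objective: faster
-- what changed: B decouples generation from matching: it grows the scoreboard as a string in doubling batches with no per-digit checks, then runs one library substring search (str.find) per batch, instead of A's two join(map(str, slice)) window comparisons after every appended digit.
-- intended difference: For target=3 (the only target whose digit string occurs at index 0 but has length 1), A never checks the window ending at position 1 and returns the next occurrence, 52, while B returns the true first occurrence, 0, which is the intended answer. — e.g. on part2(3): A returns 52, B returns 0
import Mathlib
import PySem

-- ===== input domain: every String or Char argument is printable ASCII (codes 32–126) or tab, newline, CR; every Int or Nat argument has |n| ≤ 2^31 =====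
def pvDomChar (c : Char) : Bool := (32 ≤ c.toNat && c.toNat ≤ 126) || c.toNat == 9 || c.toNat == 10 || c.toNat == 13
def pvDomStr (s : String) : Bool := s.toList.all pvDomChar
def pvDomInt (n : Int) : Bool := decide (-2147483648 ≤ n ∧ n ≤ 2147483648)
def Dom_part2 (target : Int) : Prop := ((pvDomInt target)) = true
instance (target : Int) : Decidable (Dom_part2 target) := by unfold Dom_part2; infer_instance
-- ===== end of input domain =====

-- B separates generation from matching: it grows the scoreboard in doubling batches with no
-- per-digit checks and runs one substring search (str.find) per batch, instead of A's two
-- join(map(str, slice)) window comparisons after every appended digit.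

-- Fuel bound for the ports' `while True` loops (Python's loops have no bound; at the fuel
-- horizon the ports report what the board built so far yields: A has checked every window
-- it created, so it returns -1; B runs its pending search on the board built so far).
def pvFuel : Nat := 999999999 + 1

-- ===== PORT A =====
-- Python's list is ported as Array (O(1) append/index, like list.append / list[i]).
-- inner `for digit in str(new_score)` loop: either an early return (.inl) or the extended array (.inr)
def partA_digits (t : List Char) (tlen : Int) : Array Int → List Char → Sum Int (Array Int)
  | recipes, [] => .inr recipes
  | recipes, c :: cs =>
    -- recipes.append(int(digit))  (int('0'..'9') never raises here)
    let r' := recipes.push ((PySem.Int.ofChars? [c]).getD 0)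
    if ((r'.size : Int) ≥ tlen) then
      -- ''.join(map(str, recipes[-target_len:])): the extract bounds are Python's clamped
      -- slice bounds for these in-range negative indices (clamped ℕ subtraction)
      if PySem.Chars.join [] ((r'.extract (r'.size - tlen.toNat) r'.size).toList.map PySem.Int.toChars) = t then
        .inl ((r'.size : Int) - tlen)
      else if ((r'.size : Int) > tlen) ∧
              (PySem.Chars.join [] ((r'.extract (r'.size - (tlen.toNat + 1)) (r'.size - 1)).toList.map PySem.Int.toChars) = t) then
        .inl ((r'.size : Int) - tlen - 1)
      else partA_digits t tlen r' cs
    else partA_digits t tlen r' cs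

-- the `while True` loop; recipes[elf] is ported with default 0, exact because the elves'
-- indices are always kept in [0, len) by the `% len(recipes)` updates
def partA_loop (t : List Char) (tlen : Int) : Nat → Array Int → Int → Int → Int
  | 0, _, _, _ => -1
  | fuel + 1, recipes, elf1, elf2 =>
    let s := (recipes[elf1.toNat]?).getD 0 + (recipes[elf2.toNat]?).getD 0
    match partA_digits t tlen recipes (PySem.Int.toChars s) with
    | .inl r => r
    | .inr r' =>
      partA_loop t tlen fuel r'
        (PySem.Int.mod (elf1 + 1 + (r'[elf1.toNat]?).getD 0) (r'.size : Int))
        (PySem.Int.mod (elf2 + 1 + (r'[elf2.toNat]?).getD 0) (r'.size : Int))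

def part2 (target : Int) : Int :=
  partA_loop (PySem.Int.toChars target) (((PySem.Int.toChars target).length : Nat) : Int) pvFuel #[3, 7] 0 1

-- ===== PORT B =====
-- phase 1: `while len(board) < goal` — pure generation, no checks; board is a Python str,
-- ported as Array Char (O(1) index / amortised-O(1) extend, like str concat);
-- int(board[elf]) is ported with getElem?/getD '0', exact: the elves stay in [0, len)
def partB_gen : Nat → Nat → Array Char → Int → Int → Nat × Array Char × Int × Int
  | fuel, goal, board, elf1, elf2 =>
    if board.size < goal then
      match fuel with
      | 0 => (0, board, elf1, elf2)
      | f + 1 =>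
        let total := (PySem.Int.ofChars? [(board[elf1.toNat]?).getD '0']).getD 0
                   + (PySem.Int.ofChars? [(board[elf2.toNat]?).getD '0']).getD 0
        let board' := board ++ (PySem.Int.toChars total).toArray
        partB_gen f goal board'
          (PySem.Int.mod (elf1 + 1 + (PySem.Int.ofChars? [(board'[elf1.toNat]?).getD '0']).getD 0) (board'.size : Int))
          (PySem.Int.mod (elf2 + 1 + (PySem.Int.ofChars? [(board'[elf2.toNat]?).getD '0']).getD 0) (board'.size : Int))
    else (fuel, board, elf1, elf2)

-- the `while True` loop: double, then one board.find(target_str) per batch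
def partB_loop (t : List Char) : Nat → Nat → Array Char → Int → Int → Int
  | 0, _, board, _, _ => PySem.Chars.find board.toList t
  | o + 1, steps, board, elf1, elf2 =>
    match partB_gen steps (2 * board.size) board elf1 elf2 with
    | (steps', board', elf1', elf2') =>
      if steps' = 0 then PySem.Chars.find board'.toList t
      else
        let idx := PySem.Chars.find board'.toList t
        if idx ≠ -1 then idx
        else partB_loop t o steps' board' elf1' elf2'

def part2_alt (target : Int) : Int :=
  partB_loop (PySem.Int.toChars target) pvFuel pvFuel #['3', '7'] 0 1

-- ===== PRECONDITION & SPEC =====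
-- Pre_ excludes negative targets: str(target) then contains '-', which never occurs in the
-- digit stream, so Python A loops forever (it never returns) on them.
def Pre_part2 (target : Int) : Prop := 0 ≤ target
instance (target : Int) : Decidable (Pre_part2 target) := by unfold Pre_part2; infer_instance
def pvWitness_part2 : Int := 51589

-- For target=3 (the only target whose digit string occurs at index 0 of the stream but has
-- length 1), A never checks the window ending at position 1 and returns the next occurrence,
-- 52, while B returns the true first occurrence, 0, which is the intended answer.
def D_part2 (target : Int) : Prop := target = 3
instance (target : Int) : Decidable (D_part2 target) := by unfold D_part2; infer_instance

def Spec_part2 (target : Int) (out : Int) : Prop := ¬ D_part2 target → out = part2_alt target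
instance (target : Int) (out : Int) : Decidable (Spec_part2 target out) := by unfold Spec_part2; infer_instance

def pvDiffWitness_part2 : Int := 3
def pvDiffWitnessOut_part2 : Int × Int := (52, 0)

-- ===== CLAIM (what is proved, stated in full; the proofs are below) =====
def Claim_unchanged_part2 : Prop := ∀ (target : Int), Dom_part2 target → Pre_part2 target → Spec_part2 target (part2 target)
def Claim_changed_part2 : Prop := Dom_part2 (pvDiffWitness_part2) ∧ Pre_part2 (pvDiffWitness_part2) ∧ D_part2 (pvDiffWitness_part2) ∧ part2 (pvDiffWitness_part2) = pvDiffWitnessOut_part2.1 ∧ part2_alt (pvDiffWitness_part2) = pvDiffWitnessOut_part2.2 ∧ pvDiffWitnessOut_part2.1 ≠ pvDiffWitnessOut_part2.2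
def Claim_exact_part2 : Prop := ∀ (target : Int), Dom_part2 target → Pre_part2 target → D_part2 target → part2 target ≠ part2_alt target

-- ===== LEMMAS AND PROOFS =====

-- the character str(d) consists of, for a single digit d
def dchar (d : Int) : Char := Char.ofNat (48 + d.toNat)

-- int(board[e]) on a char board, as B's port computes it
def chDigit (board : List Char) (e : Int) : Int :=
  (PySem.Int.ofChars? [(PySem.List.pyGet? board e).getD '0']).getD 0

-- one step of the recipe process over the char board (the common mathematical model)
def stStep : List Char × Int × Int → List Char × Int × Int
  | (board, e1, e2) =>
    let board' := board ++ PySem.Int.toChars (chDigit board e1 + chDigit board e2)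
    (board', PySem.Int.mod (e1 + 1 + chDigit board' e1) (board'.length : Int),
             PySem.Int.mod (e2 + 1 + chDigit board' e2) (board'.length : Int))

-- List-level models of the two ports (the ports run on Array = Python's list/str; the
-- equivalence induction below is carried out on these list versions, which the simulation
-- lemmas further down connect to the Array ports)
def partA_digitsL (t : List Char) (tlen : Int) : List Int → List Char → Sum Int (List Int)
  | recipes, [] => .inr recipes
  | recipes, c :: cs =>
    let r' := recipes ++ [(PySem.Int.ofChars? [c]).getD 0]
    if ((r'.length : Int) ≥ tlen) then
      if PySem.Chars.join [] ((PySem.List.slice r' (some (-tlen)) none).map PySem.Int.toChars) = t then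
        .inl ((r'.length : Int) - tlen)
      else if ((r'.length : Int) > tlen) ∧
              (PySem.Chars.join [] ((PySem.List.slice r' (some (-tlen - 1)) (some (-1))).map PySem.Int.toChars) = t) then
        .inl ((r'.length : Int) - tlen - 1)
      else partA_digitsL t tlen r' cs
    else partA_digitsL t tlen r' cs

def partA_loopL (t : List Char) (tlen : Int) : Nat → List Int → Int → Int → Int
  | 0, _, _, _ => -1
  | fuel + 1, recipes, elf1, elf2 =>
    let s := PySem.List.pyGetD recipes elf1 0 + PySem.List.pyGetD recipes elf2 0
    match partA_digitsL t tlen recipes (PySem.Int.toChars s) with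
    | .inl r => r
    | .inr r' =>
      partA_loopL t tlen fuel r'
        (PySem.Int.mod (elf1 + 1 + PySem.List.pyGetD r' elf1 0) (r'.length : Int))
        (PySem.Int.mod (elf2 + 1 + PySem.List.pyGetD r' elf2 0) (r'.length : Int))

def partB_genL : Nat → Nat → List Char → Int → Int → Nat × List Char × Int × Int
  | fuel, goal, board, elf1, elf2 =>
    if board.length < goal then
      match fuel with
      | 0 => (0, board, elf1, elf2)
      | f + 1 =>
        let total := (PySem.Int.ofChars? [(PySem.List.pyGet? board elf1).getD '0']).getD 0
                   + (PySem.Int.ofChars? [(PySem.List.pyGet? board elf2).getD '0']).getD 0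
        let board' := board ++ PySem.Int.toChars total
        partB_genL f goal board'
          (PySem.Int.mod (elf1 + 1 + (PySem.Int.ofChars? [(PySem.List.pyGet? board' elf1).getD '0']).getD 0) (board'.length : Int))
          (PySem.Int.mod (elf2 + 1 + (PySem.Int.ofChars? [(PySem.List.pyGet? board' elf2).getD '0']).getD 0) (board'.length : Int))
    else (fuel, board, elf1, elf2)

def partB_loopL (t : List Char) : Nat → Nat → List Char → Int → Int → Int
  | 0, _, board, _, _ => PySem.Chars.find board t
  | o + 1, steps, board, elf1, elf2 =>
    match partB_genL steps (2 * board.length) board elf1 elf2 with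
    | (steps', board', elf1', elf2') =>
      if steps' = 0 then PySem.Chars.find board' t
      else
        let idx := PySem.Chars.find board' t
        if idx ≠ -1 then idx
        else partB_loopL t o steps' board' elf1' elf2'

theorem toChars_digit (d : Int) (h0 : 0 ≤ d) (h9 : d ≤ 9) : PySem.Int.toChars d = [dchar d] := by
  interval_cases d <;> decide

theorem ofChars_dchar (d : Int) (h0 : 0 ≤ d) (h9 : d ≤ 9) : (PySem.Int.ofChars? [dchar d]).getD 0 = d := by
  interval_cases d <;> decide

theorem toChars_score (s : Int) (h0 : 0 ≤ s) (h18 : s ≤ 18) :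
    PySem.Int.toChars s = (if s ≥ 10 then [1, s - 10] else [s]).map dchar := by
  interval_cases s <;> decide

theorem score_digits (s : Int) (h0 : 0 ≤ s) (h18 : s ≤ 18) :
    ∀ d ∈ (if s ≥ 10 then [1, s - 10] else [s]), 0 ≤ d ∧ d ≤ 9 := by
  split_ifs <;> simp <;> omega

theorem getD_digit (xs : List Int) (h : ∀ d ∈ xs, 0 ≤ d ∧ d ≤ 9) (i : Int) :
    0 ≤ PySem.List.pyGetD xs i 0 ∧ PySem.List.pyGetD xs i 0 ≤ 9 := by
  by_cases hx : PySem.Raise.InRange xs.length i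
  · exact h _ (PySem.List.pyGetD_mem xs 0 hx)
  · rw [PySem.List.pyGetD_of_none xs i 0 ((PySem.List.pyGet?_eq_none_iff xs i).mpr hx)]
    omega

theorem join_digits (xs : List Int) (h : ∀ d ∈ xs, 0 ≤ d ∧ d ≤ 9) :
    PySem.Chars.join [] (xs.map PySem.Int.toChars) = xs.map dchar := by
  have hmap : xs.map PySem.Int.toChars = (xs.map dchar).map (fun c => [c]) := by
    rw [List.map_map]
    exact List.map_congr_left fun d hd => toChars_digit d (h d hd).1 (h d hd).2
  rw [hmap, PySem.Chars.join_nil_singletons]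

-- int(board[e]) on the mapped char board is recipes[e] (A's int read)
theorem chDigit_mapd (bs : List Int) (h : ∀ d ∈ bs, 0 ≤ d ∧ d ≤ 9) (e : Int) :
    chDigit (bs.map dchar) e = PySem.List.pyGetD bs e 0 := by
  have h0 : '0' = dchar 0 := by decide
  have := PySem.List.pyGetD_map dchar bs e 0
  unfold chDigit
  show (PySem.Int.ofChars? [PySem.List.pyGetD (bs.map dchar) e '0']).getD 0 = _
  rw [h0, this]
  exact ofChars_dchar _ (getD_digit bs h e).1 (getD_digit bs h e).2

theorem slice_prev {α : Type} (k : Nat) (hk : 0 < k) (xs : List α) (d : α) (hlen : k ≤ xs.length) :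
    PySem.List.slice (xs ++ [d]) (some (-(k : Int) - 1)) (some (-1)) = xs.drop (xs.length - k) := by
  have ha : PySem.List.clampIdx (xs ++ [d]).length (-(k : Int) - 1) = xs.length - k := by
    simp only [PySem.List.clampIdx, List.length_append, List.length_cons, List.length_nil]
    rw [if_pos (by omega), if_neg (by push_cast; omega)]
    push_cast; omega
  have hb : PySem.List.clampIdx (xs ++ [d]).length (-1) = xs.length := by
    simp only [PySem.List.clampIdx, List.length_append, List.length_cons, List.length_nil]
    rw [if_pos (by omega), if_neg (by push_cast; omega)]
    push_cast; omega
  simp only [PySem.List.slice, ha, hb]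
  rw [List.drop_append_of_le_length (by omega)]
  have h1 : xs.length - (xs.length - k) = k := by omega
  rw [h1]
  exact List.take_left' (by rw [List.length_drop]; omega)

theorem toDigitsCore_ne_nil (b : Nat) : ∀ (fuel n : Nat) (ds : List Char), ds ≠ [] → Nat.toDigitsCore b fuel n ds ≠ [] := by
  intro fuel
  induction fuel with
  | zero => intro n ds h; simpa [Nat.toDigitsCore] using h
  | succ f ih =>
    intro n ds h
    simp only [Nat.toDigitsCore]
    split
    · simp
    · exact ih _ _ (by simp)

theorem toChars_ne_nil (n : Int) : PySem.Int.toChars n ≠ [] := by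
  unfold PySem.Int.toChars
  split
  · simp
  · unfold Nat.toDigits
    simp only [Nat.toDigitsCore]
    split
    · simp
    · exact toDigitsCore_ne_nil 10 _ _ _ (by simp)

theorem toDigitsCore_len : ∀ (fuel n : Nat) (ds : List Char), 0 < fuel →
    ds.length + 1 ≤ (Nat.toDigitsCore 10 fuel n ds).length := by
  intro fuel
  induction fuel with
  | zero => omega
  | succ f ih =>
    intro n ds _
    simp only [Nat.toDigitsCore]
    split
    · simp
    · rcases Nat.eq_zero_or_pos f with hf | hf
      · subst hf; simp [Nat.toDigitsCore]
      · have := ih (n / 10) ((n % 10).digitChar :: ds) hf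
        simp only [List.length_cons] at this
        omega

theorem toDigitsCore_len2 : ∀ (fuel n : Nat) (ds : List Char), 2 ≤ fuel → 10 ≤ n →
    ds.length + 2 ≤ (Nat.toDigitsCore 10 fuel n ds).length := by
  intro fuel
  match fuel with
  | 0 => intro n ds h; omega
  | 1 => intro n ds h; omega
  | f + 2 =>
    intro n ds _ hn
    simp only [Nat.toDigitsCore]
    split
    · next hz =>
      rw [Nat.div_eq_zero_iff] at hz
      omega
    · have := toDigitsCore_len (f + 1) (n / 10) ((n % 10).digitChar :: ds) (by omega)
      simp only [Nat.toDigitsCore, List.length_cons] at this ⊢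
      omega

theorem toDigitsCore_len3 : ∀ (fuel n : Nat) (ds : List Char), 3 ≤ fuel → 100 ≤ n →
    ds.length + 3 ≤ (Nat.toDigitsCore 10 fuel n ds).length := by
  intro fuel
  match fuel with
  | 0 => intro n ds h; omega
  | 1 => intro n ds h; omega
  | 2 => intro n ds h; omega
  | f + 3 =>
    intro n ds _ hn
    simp only [Nat.toDigitsCore]
    split
    · next hz =>
      rw [Nat.div_eq_zero_iff] at hz
      omega
    · have := toDigitsCore_len2 (f + 2) (n / 10) ((n % 10).digitChar :: ds) (by omega)
        (by omega)
      simp only [Nat.toDigitsCore, List.length_cons] at this ⊢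
      omega

theorem toChars_len_ge3 (n : Int) (h : 100 ≤ n) : 3 ≤ (PySem.Int.toChars n).length := by
  unfold PySem.Int.toChars
  rw [if_neg (by omega)]
  unfold Nat.toDigits
  have := toDigitsCore_len3 (n.toNat + 1) n.toNat [] (by omega) (by omega)
  simpa using this

theorem toChars_eq_digit (n : Int) (h0 : 0 ≤ n) :
    (PySem.Int.toChars n = ['3'] → n = 3) ∧ (PySem.Int.toChars n = ['7'] → n = 7) ∧
    (PySem.Int.toChars n = ['3','7'] → n = 37) := by
  by_cases h99 : n ≤ 99
  · interval_cases n <;> refine ⟨?_, ?_, ?_⟩ <;> decide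
  · have := toChars_len_ge3 n (by omega)
    refine ⟨?_, ?_, ?_⟩ <;> intro h <;> rw [h] at this <;> simp at this

-- ---- occurrence bookkeeping: t <+: board.drop j is "t occurs at index j" ----

theorem occ_persist {t bd e : List Char} {j : Nat} (h : t <+: bd.drop j) :
    t <+: (bd ++ e).drop j := by
  by_cases hj : j ≤ bd.length
  · rw [List.drop_append_of_le_length hj]
    exact h.trans (List.prefix_append _ _)
  · have : bd.drop j = [] := List.drop_eq_nil_of_le (by omega)
    rw [this, List.prefix_nil] at h
    simp [h]

theorem occ_reflect {t bd e : List Char} {j : Nat} (h : t <+: (bd ++ e).drop j)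
    (hle : j + t.length ≤ bd.length) : t <+: bd.drop j := by
  rw [List.drop_append_of_le_length (by omega)] at h
  rw [List.prefix_iff_eq_take] at h ⊢
  rw [List.take_append_of_le_length (by rw [List.length_drop]; omega)] at h
  exact h

theorem suffix_occ {t bd : List Char} (hL : t.length ≤ bd.length) :
    bd.drop (bd.length - t.length) = t ↔ t <+: bd.drop (bd.length - t.length) := by
  constructor
  · intro h; rw [h]
  · intro h
    have hlen : (bd.drop (bd.length - t.length)).length = t.length := by
      rw [List.length_drop]; omega
    exact (h.eq_of_length (by omega)).symm

-- prefix of a longer list through iteration of stStep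
theorem board_iter_prefix (n : Nat) (st : List Char × Int × Int) :
    st.1 <+: (stStep^[n] st).1 := by
  induction n generalizing st with
  | zero => simp
  | succ m ih =>
    rw [Function.iterate_succ_apply]
    refine List.IsPrefix.trans ?_ (ih (stStep st))
    obtain ⟨bd, e1, e2⟩ := st
    exact List.prefix_append _ _

-- ---- characterizations of find / findFrom via occurrences ----

theorem occ_exists_iff_infix (t bd : List Char) : (∃ j, t <+: bd.drop j) ↔ t <:+: bd := by
  rw [PySem.Chars.exists_prefix_drop_iff_isIn, PySem.Chars.isIn_iff_infix]

theorem find_eq_of {t bd : List Char} (j : Nat) (hj : t <+: bd.drop j)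
    (hmin : ∀ i, i < j → ¬ t <+: bd.drop i) : PySem.Chars.find bd t = (j : Int) := by
  have hne : PySem.Chars.find bd t ≠ -1 := by
    rw [PySem.Chars.find_ne_neg_one_iff, ← occ_exists_iff_infix]
    exact ⟨j, hj⟩
  have hge : 0 ≤ PySem.Chars.find bd t := by
    have := PySem.Chars.neg_one_le_find bd t; omega
  obtain ⟨hocc, hm⟩ := PySem.Chars.find_spec hge
  rcases Nat.lt_trichotomy (PySem.Chars.find bd t).toNat j with h | h | h
  · exact absurd hocc (hmin _ h)
  · omega
  · exact absurd hj (hm j h)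

theorem findFrom_eq_of {t bd : List Char} (base j : Nat) (hbase : base ≤ bd.length)
    (hbj : base ≤ j) (hj : t <+: bd.drop j)
    (hmin : ∀ i, base ≤ i → i < j → ¬ t <+: bd.drop i) :
    PySem.Chars.findFrom bd t (base : Int) none = (j : Int) := by
  have hne : PySem.Chars.findFrom bd t (base : Int) none ≠ -1 := by
    intro hcon
    rw [PySem.Chars.findFrom_natCast_eq_neg_one_iff bd t base hbase] at hcon
    apply hcon
    rw [← occ_exists_iff_infix]
    refine ⟨j - base, ?_⟩
    rw [List.drop_drop]
    convert hj using 2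
    omega
  obtain ⟨hge, hocc, hm⟩ := PySem.Chars.findFrom_natCast_spec bd t base hbase hne
  have hnn : 0 ≤ PySem.Chars.findFrom bd t (base : Int) none := by omega
  rcases Nat.lt_trichotomy (PySem.Chars.findFrom bd t (base : Int) none).toNat j with h | h | h
  · exact absurd hocc (hmin _ (by omega) h)
  · omega
  · exact absurd hj (hm j hbj h)

theorem findFrom_neg_one_of {t bd : List Char} (base : Nat) (hbase : base ≤ bd.length)
    (h : ∀ j, base ≤ j → ¬ t <+: bd.drop j) :
    PySem.Chars.findFrom bd t (base : Int) none = -1 := by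
  rw [PySem.Chars.findFrom_natCast_eq_neg_one_iff bd t base hbase]
  rw [← occ_exists_iff_infix]
  rintro ⟨j, hj⟩
  rw [List.drop_drop] at hj
  refine h _ ?_ hj
  omega

-- a found result is stable under extending the board
theorem find_extend {t bd e : List Char} (h : 0 ≤ PySem.Chars.find bd t) :
    PySem.Chars.find (bd ++ e) t = PySem.Chars.find bd t := by
  obtain ⟨hocc, hm⟩ := PySem.Chars.find_spec h
  have hfit : (PySem.Chars.find bd t).toNat + t.length ≤ bd.length := by
    have := hocc.length_le
    rw [List.length_drop] at this
    have hle : PySem.Chars.find bd t ≤ bd.length := PySem.Chars.find_le_length bd t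
    omega
  rw [find_eq_of (PySem.Chars.find bd t).toNat (occ_persist hocc)
    (fun i hi hcon => hm i hi (occ_reflect hcon (by omega)))]
  omega


theorem innerA (t : List Char) (ht : 0 < t.length) (base : Nat)
    (hb1 : base ≤ 1) (hb2 : 2 ≤ t.length → base = 0) :
    ∀ (ds bs : List Int),
    (∀ d ∈ ds, 0 ≤ d ∧ d ≤ 9) → (∀ d ∈ bs, 0 ≤ d ∧ d ≤ 9) → 2 ≤ bs.length →
    (∀ j, base ≤ j → ¬ t <+: ((bs.map dchar)).drop j) →
    (partA_digitsL t ((t.length : Nat) : Int) bs (ds.map dchar) = .inr (bs ++ ds) ∧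
       ∀ j, base ≤ j → ¬ t <+: (((bs ++ ds).map dchar)).drop j)
    ∨ (∃ j : Nat, base ≤ j ∧ t <+: (((bs ++ ds).map dchar)).drop j ∧
         (∀ i, base ≤ i → i < j → ¬ t <+: (((bs ++ ds).map dchar)).drop i) ∧
         partA_digitsL t ((t.length : Nat) : Int) bs (ds.map dchar) = .inl ((j : Nat) : Int)) := by
  intro ds
  induction ds with
  | nil =>
    intro bs _ hbs _ hinv
    left
    exact ⟨by simp [partA_digitsL], by simpa using hinv⟩
  | cons d ds ih =>
    intro bs hds hbs hlen hinv
    obtain ⟨hd0, hd9⟩ := hds d List.mem_cons_self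
    have hds' : ∀ x ∈ ds, 0 ≤ x ∧ x ≤ 9 := fun x hx => hds x (List.mem_cons_of_mem _ hx)
    have hbs' : ∀ x ∈ bs ++ [d], 0 ≤ x ∧ x ≤ 9 := by
      intro x hx
      rcases List.mem_append.mp hx with h | h
      · exact hbs x h
      · simp only [List.mem_singleton] at h
        exact h ▸ ⟨hd0, hd9⟩
    simp only [List.map_cons, partA_digitsL, ofChars_dchar d hd0 hd9]
    set n := bs.length with hn
    have hlen' : (bs ++ [d]).length = n + 1 := by simp [hn]
    -- the main window check is "t occurs at the very end of bs ++ [d]"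
    have emain : PySem.Chars.join []
        ((PySem.List.slice (bs ++ [d]) (some (-((t.length : Nat) : Int))) none).map PySem.Int.toChars)
        = ((bs ++ [d]).map dchar).drop ((n + 1) - t.length) := by
      rw [PySem.List.slice_from_neg_natCast _ _ ht,
          join_digits _ (fun x hx => hbs' x (List.mem_of_mem_drop hx)),
          List.map_drop, hlen']
    have hassoc : bs ++ d :: ds = (bs ++ [d]) ++ ds := by simp
    by_cases hL : t.length ≤ n + 1
    · rw [if_pos (by rw [hlen']; exact_mod_cast hL)]
      by_cases hmain : ((bs ++ [d]).map dchar).drop ((n + 1) - t.length) = t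
      · rw [emain, if_pos hmain]
        right
        have hmaplen : ((bs ++ [d]).map dchar).length = n + 1 := by simp [hn]
        have hocc1 : t <+: ((bs ++ [d]).map dchar).drop ((n + 1) - t.length) := by
          have := (suffix_occ (t := t) (bd := (bs ++ [d]).map dchar) (by omega)).mp
          rw [hmaplen] at this
          exact this hmain
        refine ⟨(n + 1) - t.length, ?_, ?_, ?_, ?_⟩
        · -- base ≤ j
          rcases Nat.lt_or_ge t.length 2 with h2 | h2
          · omega
          · rw [hb2 h2]; omega
        · rw [hassoc, List.map_append]
          exact occ_persist hocc1
        · intro i hbi hij hcon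
          have hrefl1 : t <+: ((bs ++ [d]).map dchar).drop i := by
            rw [hassoc, List.map_append] at hcon
            refine occ_reflect hcon ?_
            rw [hmaplen]; omega
          have hrefl2 : t <+: (bs.map dchar).drop i := by
            have : (bs ++ [d]).map dchar = bs.map dchar ++ [dchar d] := by simp
            rw [this] at hrefl1
            refine occ_reflect hrefl1 ?_
            rw [List.length_map]; omega
          exact hinv i hbi hrefl2
        · have : ((((bs ++ [d]).length : Nat) : Int)) - ((t.length : Nat) : Int)
              = (((n + 1 - t.length : Nat)) : Int) := by
            rw [hlen']; push_cast; omega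
          rw [this]
      · rw [emain, if_neg hmain]
        -- the elif never fires: it would be an occurrence wholly inside bs, refuted by hinv
        have helif : ¬ (((((bs ++ [d]).length : Nat) : Int) > ((t.length : Nat) : Int)) ∧
            PySem.Chars.join [] ((PySem.List.slice (bs ++ [d])
              (some (-((t.length : Nat) : Int) - 1)) (some (-1))).map PySem.Int.toChars) = t) := by
          rintro ⟨hgt, hj⟩
          have hLn : t.length ≤ n := by
            rw [hlen'] at hgt
            have hgt' : ((t.length : Nat) : Int) < ((n + 1 : Nat) : Int) := hgt
            have := Int.ofNat_lt.mp hgt'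
            omega
          rw [slice_prev t.length ht bs d hLn,
              join_digits _ (fun x hx => hbs x (List.mem_of_mem_drop hx))] at hj
          have hj' : (bs.map dchar).drop (n - t.length) = t := by
            rw [List.map_drop] at hj; exact hj
          have hocc : t <+: (bs.map dchar).drop ((bs.map dchar).length - t.length) := by
            refine (suffix_occ (by rw [List.length_map]; omega)).mp ?_
            rw [List.length_map]
            exact hj'
          have hbase : base ≤ (bs.map dchar).length - t.length := by
            rw [List.length_map]
            rcases Nat.lt_or_ge t.length 2 with h2 | h2
            · omega
            · rw [hb2 h2]; omega
          exact hinv _ hbase hocc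
        rw [if_neg helif]
        -- no new occurrence: extend the invariant and recurse
        have hinv' : ∀ j, base ≤ j → ¬ t <+: ((bs ++ [d]).map dchar).drop j := by
          intro j hbj hcon
          have hmaplen : ((bs ++ [d]).map dchar).length = n + 1 := by simp [hn]
          have hfit : j + t.length ≤ n + 1 := by
            have := hcon.length_le
            rw [List.length_drop, hmaplen] at this
            omega
          rcases Nat.lt_or_ge (j + t.length) (n + 1) with hlt | hge
          · have : (bs ++ [d]).map dchar = bs.map dchar ++ [dchar d] := by simp
            rw [this] at hcon
            exact hinv j hbj (occ_reflect hcon (by rw [List.length_map]; omega))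
          · have hjv : j = (n + 1) - t.length := by omega
            apply hmain
            subst hjv
            have := (suffix_occ (t := t) (bd := (bs ++ [d]).map dchar) (by simp [hn]; omega)).mpr
            rw [hmaplen] at this
            exact this hcon
        have hres := ih (bs ++ [d]) hds' hbs' (by simp; omega) hinv'
        rw [← hassoc] at hres
        exact hres
    · rw [if_neg (by rw [hlen']; push_cast; omega)]
      have hinv' : ∀ j, base ≤ j → ¬ t <+: ((bs ++ [d]).map dchar).drop j := by
        intro j _ hcon
        have := hcon.length_le
        rw [List.length_drop, List.length_map, hlen'] at this
        omega
      have hres := ih (bs ++ [d]) hds' hbs' (by simp; omega) hinv'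
      rw [← hassoc] at hres
      exact hres

theorem loopA (t : List Char) (ht : 0 < t.length) (base : Nat)
    (hb1 : base ≤ 1) (hb2 : 2 ≤ t.length → base = 0) :
    ∀ (fuel : Nat) (bs : List Int) (e1 e2 : Int),
    (∀ d ∈ bs, 0 ≤ d ∧ d ≤ 9) → 2 ≤ bs.length →
    (∀ j, base ≤ j → ¬ t <+: ((bs.map dchar)).drop j) →
    partA_loopL t ((t.length : Nat) : Int) fuel bs e1 e2
      = PySem.Chars.findFrom (stStep^[fuel] (bs.map dchar, e1, e2)).1 t (base : Int) none := by
  intro fuel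
  induction fuel with
  | zero =>
    intro bs e1 e2 _ hlen hinv
    simp only [Function.iterate_zero, id]
    rw [findFrom_neg_one_of base (by rw [List.length_map]; omega) hinv]
    rfl
  | succ fuel ihf =>
    intro bs e1 e2 hbs hlen hinv
    simp only [partA_loopL]
    have h1 := getD_digit bs hbs e1
    have h2 := getD_digit bs hbs e2
    set s : Int := PySem.List.pyGetD bs e1 0 + PySem.List.pyGetD bs e2 0 with hs
    have hs0 : 0 ≤ s := by omega
    have hs18 : s ≤ 18 := by omega
    set ds : List Int := if s ≥ 10 then [1, s - 10] else [s] with hdsdef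
    have hdsok : ∀ d ∈ ds, 0 ≤ d ∧ d ≤ 9 := score_digits s hs0 hs18
    have hbs' : ∀ x ∈ bs ++ ds, 0 ≤ x ∧ x ≤ 9 := by
      intro x hx
      rcases List.mem_append.mp hx with h | h
      · exact hbs x h
      · exact hdsok x h
    have hstep : stStep (bs.map dchar, e1, e2) = ((bs ++ ds).map dchar,
        PySem.Int.mod (e1 + 1 + PySem.List.pyGetD (bs ++ ds) e1 0) (((bs ++ ds).length : Nat) : Int),
        PySem.Int.mod (e2 + 1 + PySem.List.pyGetD (bs ++ ds) e2 0) (((bs ++ ds).length : Nat) : Int)) := by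
      show ((bs.map dchar) ++ PySem.Int.toChars (chDigit (bs.map dchar) e1 + chDigit (bs.map dchar) e2), _, _) = _
      rw [chDigit_mapd bs hbs e1, chDigit_mapd bs hbs e2, ← hs, toChars_score s hs0 hs18, ← hdsdef,
        ← List.map_append]
      refine Prod.ext rfl (Prod.ext ?_ ?_) <;>
        · show PySem.Int.mod (_ + 1 + chDigit ((bs ++ ds).map dchar) _) ((((bs ++ ds).map dchar).length : Nat) : Int) = _
          rw [chDigit_mapd (bs ++ ds) hbs' , List.length_map]
    rw [toChars_score s hs0 hs18, ← hdsdef]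
    rcases innerA t ht base hb1 hb2 ds bs hdsok hbs hlen hinv with ⟨heq, hinv'⟩ | ⟨j, hbj, hocc, hmin, heq⟩
    · rw [heq]
      show partA_loopL t ((t.length : Nat) : Int) fuel (bs ++ ds) _ _ = _
      rw [Function.iterate_succ_apply, hstep,
        ihf (bs ++ ds) _ _ hbs' (by rw [List.length_append]; omega) hinv']
    · rw [heq]
      show ((j : Nat) : Int) = _
      have hpre := board_iter_prefix fuel (stStep (bs.map dchar, e1, e2))
      obtain ⟨ext, happ⟩ := hpre
      rw [Function.iterate_succ_apply]
      have hb1' : (stStep (bs.map dchar, e1, e2)).1 = (bs ++ ds).map dchar := by rw [hstep]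
      rw [hb1'] at happ
      have hjfit : j + t.length ≤ ((bs ++ ds).map dchar).length := by
        have := hocc.length_le
        rw [List.length_drop] at this
        omega
      symm
      apply findFrom_eq_of base j
      · have hlenB : ((bs ++ ds).map dchar).length ≤ ((stStep^[fuel] (stStep (bs.map dchar, e1, e2))).1).length := by
          rw [← happ, List.length_append]; omega
        simp only [List.length_map, List.length_append] at hlenB
        omega
      · exact hbj
      · rw [← happ]
        exact occ_persist hocc
      · intro i hbi hij hcon
        rw [← happ] at hcon
        exact hmin i hbi hij (occ_reflect hcon (by omega))

theorem genB : ∀ (steps goal : Nat) (bd : List Char) (e1 e2 : Int),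
    ∃ k, k ≤ steps ∧
      partB_genL steps goal bd e1 e2 = (steps - k, stStep^[k] (bd, e1, e2)) ∧
      (steps - k = 0 ∨ goal ≤ ((stStep^[k] (bd, e1, e2)).1).length) ∧
      (goal ≤ bd.length ∨ steps = 0 ∨ 1 ≤ k) := by
  intro steps
  induction steps with
  | zero =>
    intro goal bd e1 e2
    refine ⟨0, le_refl _, ?_, Or.inl rfl, Or.inr (Or.inl rfl)⟩
    by_cases hg : bd.length < goal
    · simp only [partB_genL, if_pos hg]
      rfl
    · simp only [partB_genL, if_neg hg]
      rfl
  | succ f ih =>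
    intro goal bd e1 e2
    by_cases hg : bd.length < goal
    · obtain ⟨k, hk, heq, hd, _⟩ := ih goal (stStep (bd, e1, e2)).1
        (stStep (bd, e1, e2)).2.1 (stStep (bd, e1, e2)).2.2
      refine ⟨k + 1, by omega, ?_, ?_, Or.inr (Or.inr (by omega))⟩
      · have hnat : f + 1 - (k + 1) = f - k := by omega
        rw [hnat, Function.iterate_succ_apply]
        simp only [partB_genL]
        rw [if_pos hg]
        exact heq
      · have hnat : f + 1 - (k + 1) = f - k := by omega
        rw [hnat, Function.iterate_succ_apply]
        exact hd
    · refine ⟨0, by omega, ?_, Or.inr (by simpa using (by omega : goal ≤ bd.length)), Or.inl (by omega)⟩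
      simp only [partB_genL, if_neg hg]
      rfl

theorem loopB (t : List Char) : ∀ (outer steps : Nat) (st : List Char × Int × Int),
    steps ≤ outer → 1 ≤ st.1.length →
    partB_loopL t outer steps st.1 st.2.1 st.2.2 = PySem.Chars.find (stStep^[steps] st).1 t := by
  intro outer
  induction outer with
  | zero =>
    intro steps st hso _
    have : steps = 0 := by omega
    subst this
    obtain ⟨bd, e1, e2⟩ := st
    simp only [partB_loopL, Function.iterate_zero, id]
  | succ o ih =>
    intro steps st hso hlen
    obtain ⟨bd, e1, e2⟩ := st
    simp only [partB_loopL]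
    obtain ⟨k, hk, heq, hdisj, hfirst⟩ := genB steps (2 * bd.length) bd e1 e2
    rw [heq]
    by_cases hz : steps - k = 0
    · have hks : k = steps := by omega
      subst hks
      rw [if_pos hz]
    · rw [if_neg hz]
      have hnogoal : ¬ (2 * bd.length ≤ bd.length) := by simp at hlen; omega
      have hk1 : 1 ≤ k := by
        rcases hfirst with h | h | h
        · exact absurd h hnogoal
        · omega
        · exact h
      have hiter : stStep^[steps] (bd, e1, e2) = stStep^[steps - k] (stStep^[k] (bd, e1, e2)) := by
        have : steps = (steps - k) + k := by omega
        rw [this, Function.iterate_add_apply]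
        congr 1
        omega
      obtain ⟨ext, happ⟩ := board_iter_prefix (steps - k) (stStep^[k] (bd, e1, e2))
      by_cases hidx : PySem.Chars.find ((stStep^[k] (bd, e1, e2)).1) t = -1
      · rw [if_neg (by simp [hidx])]
        have hlen' : 1 ≤ ((stStep^[k] (bd, e1, e2)).1).length := by
          obtain ⟨ext2, happ2⟩ := board_iter_prefix k (bd, e1, e2)
          rw [← happ2, List.length_append]
          omega
        rw [ih (steps - k) (stStep^[k] (bd, e1, e2)) (by omega) hlen', ← hiter]
      · rw [if_pos (by simp [hidx])]
        rw [hiter, ← happ, find_extend]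
        have := PySem.Chars.neg_one_le_find ((stStep^[k] (bd, e1, e2)).1) t
        omega

-- ---- simulation of the Array ports by the list models ----

theorem getD_sim {α : Type} (a : Array α) (i : Int) (d : α) (h : 0 ≤ i) :
    (a[i.toNat]?).getD d = PySem.List.pyGetD a.toList i d := by
  have hi : i = ((i.toNat : Nat) : Int) := by omega
  conv_rhs => rw [hi]
  rw [PySem.List.pyGetD_natCast, List.getD_eq_getElem?_getD, Array.getElem?_toList]

theorem extract_last (L : Nat) (hL : 0 < L) (a : Array Int) :
    (a.extract (a.size - L) a.size).toList = PySem.List.slice a.toList (some (-(L : Int))) none := by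
  rw [PySem.List.slice_from_neg_natCast _ _ hL, Array.toList_extract, List.extract_eq_take_drop,
      ← Array.length_toList]
  exact List.take_of_length_le (by rw [List.length_drop])

theorem extract_prev (L : Nat) (hL : 0 < L) (a : Array Int) (h : L + 1 ≤ a.size) :
    (a.extract (a.size - (L + 1)) (a.size - 1)).toList
      = PySem.List.slice a.toList (some (-(L : Int) - 1)) (some (-1)) := by
  have ha : PySem.List.clampIdx a.toList.length (-(L : Int) - 1) = a.size - (L + 1) := by
    rw [Array.length_toList]
    simp only [PySem.List.clampIdx]
    rw [if_pos (by omega), if_neg (by omega)]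
    omega
  have hb : PySem.List.clampIdx a.toList.length (-1) = a.size - 1 := by
    rw [Array.length_toList]
    simp only [PySem.List.clampIdx]
    rw [if_pos (by omega), if_neg (by omega)]
    omega
  simp only [PySem.List.slice, ha, hb]
  rw [Array.toList_extract, List.extract_eq_take_drop]

theorem digitsA_sim (t : List Char) (ht : 0 < t.length) :
    ∀ (cs : List Char) (a : Array Int),
    (Sum.map id Array.toList (partA_digits t ((t.length : Nat) : Int) a cs)
        = partA_digitsL t ((t.length : Nat) : Int) a.toList cs)
    ∧ (∀ r', partA_digits t ((t.length : Nat) : Int) a cs = .inr r' → a.size ≤ r'.size) := by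
  have htoNat : ((t.length : Nat) : Int).toNat = t.length := by omega
  intro cs
  induction cs with
  | nil =>
    intro a
    refine ⟨rfl, fun r' h => ?_⟩
    obtain rfl : a = r' := by simpa [partA_digits] using h
    exact le_refl _
  | cons c cs ih =>
    intro a
    simp only [partA_digits, partA_digitsL]
    set x : Int := (PySem.Int.ofChars? [c]).getD 0 with hxdef
    set A : Array Int := a.push x with hAdef
    have hpush : A.toList = a.toList ++ [x] := Array.toList_push
    have hmono : ∀ r', partA_digits t ((t.length : Nat) : Int) A cs = .inr r' → a.size ≤ r'.size :=
      fun r' h => le_trans (by rw [hAdef, Array.size_push]; omega) ((ih A).2 r' h)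
    have hlenA : ((A.toList.length : Nat) : Int) = ((A.size : Nat) : Int) := by
      rw [Array.length_toList]
    rw [← hpush, hlenA, htoNat, extract_last t.length ht A]
    by_cases hc1 : ((A.size : Nat) : Int) ≥ ((t.length : Nat) : Int)
    · rw [if_pos hc1, if_pos hc1]
      by_cases hc2 : PySem.Chars.join []
          ((PySem.List.slice A.toList (some (-((t.length : Nat) : Int))) none).map PySem.Int.toChars) = t
      · rw [if_pos hc2, if_pos hc2]
        exact ⟨rfl, fun r' h => by simp at h⟩
      · rw [if_neg hc2, if_neg hc2]
        by_cases hgt : ((A.size : Nat) : Int) > ((t.length : Nat) : Int)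
        · have hsz : t.length + 1 ≤ A.size := by
            push_cast at hgt
            omega
          have hj : (A.extract (A.size - (t.length + 1)) (A.size - 1)).toList
              = PySem.List.slice A.toList (some (-((t.length : Nat) : Int) - 1)) (some (-1)) :=
            extract_prev t.length ht A hsz
          rw [hj]
          by_cases hc3 : ((A.size : Nat) : Int) > ((t.length : Nat) : Int) ∧
              PySem.Chars.join []
                ((PySem.List.slice A.toList (some (-((t.length : Nat) : Int) - 1)) (some (-1))).map PySem.Int.toChars) = t
          · rw [if_pos hc3, if_pos hc3]
            exact ⟨rfl, fun r' h => by simp at h⟩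
          · rw [if_neg hc3, if_neg hc3]
            exact ⟨(ih A).1, hmono⟩
        · rw [if_neg (fun hc => hgt hc.1), if_neg (fun hc => hgt hc.1)]
          exact ⟨(ih A).1, hmono⟩
    · rw [if_neg hc1, if_neg hc1]
      exact ⟨(ih A).1, hmono⟩

theorem loopA_sim (t : List Char) (ht : 0 < t.length) :
    ∀ (fuel : Nat) (a : Array Int) (e1 e2 : Int), 0 ≤ e1 → 0 ≤ e2 → 0 < a.size →
    partA_loop t ((t.length : Nat) : Int) fuel a e1 e2
      = partA_loopL t ((t.length : Nat) : Int) fuel a.toList e1 e2 := by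
  intro fuel
  induction fuel with
  | zero => intros; rfl
  | succ fuel ihf =>
    intro a e1 e2 he1 he2 hsz
    simp only [partA_loop, partA_loopL]
    rw [getD_sim a e1 0 he1, getD_sim a e2 0 he2]
    obtain ⟨hsim, hmono⟩ := digitsA_sim t ht
      (PySem.Int.toChars (PySem.List.pyGetD a.toList e1 0 + PySem.List.pyGetD a.toList e2 0)) a
    cases harr : partA_digits t ((t.length : Nat) : Int) a
        (PySem.Int.toChars (PySem.List.pyGetD a.toList e1 0 + PySem.List.pyGetD a.toList e2 0)) with
    | inl r =>
      have hlist : partA_digitsL t ((t.length : Nat) : Int) a.toList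
          (PySem.Int.toChars (PySem.List.pyGetD a.toList e1 0 + PySem.List.pyGetD a.toList e2 0)) = .inl r := by
        rw [← hsim, harr]; rfl
      rw [hlist]
    | inr r' =>
      have hlist : partA_digitsL t ((t.length : Nat) : Int) a.toList
          (PySem.Int.toChars (PySem.List.pyGetD a.toList e1 0 + PySem.List.pyGetD a.toList e2 0)) = .inr r'.toList := by
        rw [← hsim, harr]; rfl
      have hsz' : 0 < r'.size := lt_of_lt_of_le hsz (hmono r' harr)
      have hszl : ((r'.size : Nat) : Int) = ((r'.toList.length : Nat) : Int) := by
        rw [Array.length_toList]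
      rw [hlist]
      show partA_loop t ((t.length : Nat) : Int) fuel r' _ _ = _
      rw [getD_sim r' e1 0 he1, getD_sim r' e2 0 he2, hszl]
      exact ihf r' _ _
        (PySem.Int.mod_nonneg _ (by omega))
        (PySem.Int.mod_nonneg _ (by omega))
        hsz'

theorem genB_sim : ∀ (fuel goal : Nat) (a : Array Char) (e1 e2 : Int), 0 ≤ e1 → 0 ≤ e2 →
    (partB_gen fuel goal a e1 e2).1 = (partB_genL fuel goal a.toList e1 e2).1 ∧
    ((partB_gen fuel goal a e1 e2).2.1).toList = (partB_genL fuel goal a.toList e1 e2).2.1 ∧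
    (partB_gen fuel goal a e1 e2).2.2 = (partB_genL fuel goal a.toList e1 e2).2.2 := by
  intro fuel
  induction fuel with
  | zero =>
    intro goal a e1 e2 _ _
    simp only [partB_gen, partB_genL, Array.length_toList]
    by_cases hg : a.size < goal
    · rw [if_pos hg, if_pos hg]
      exact ⟨rfl, rfl, rfl⟩
    · rw [if_neg hg, if_neg hg]
      exact ⟨rfl, rfl, rfl⟩
  | succ f ih =>
    intro goal a e1 e2 he1 he2
    simp only [partB_gen, partB_genL, Array.length_toList]
    by_cases hg : a.size < goal
    · rw [if_pos hg, if_pos hg]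
      have hget1 : (a[e1.toNat]?).getD '0' = (PySem.List.pyGet? a.toList e1).getD '0' :=
        getD_sim a e1 '0' he1
      have hget2 : (a[e2.toNat]?).getD '0' = (PySem.List.pyGet? a.toList e2).getD '0' :=
        getD_sim a e2 '0' he2
      rw [hget1, hget2]
      set total : Int := (PySem.Int.ofChars? [(PySem.List.pyGet? a.toList e1).getD '0']).getD 0
                   + (PySem.Int.ofChars? [(PySem.List.pyGet? a.toList e2).getD '0']).getD 0 with htot
      have hbd : (a ++ (PySem.Int.toChars total).toArray).toList = a.toList ++ PySem.Int.toChars total := by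
        simp
      have hsz : ((a ++ (PySem.Int.toChars total).toArray).size : Int)
          = (((a.toList ++ PySem.Int.toChars total).length : Nat) : Int) := by
        rw [← hbd, Array.length_toList]
      have hg1 : ((a ++ (PySem.Int.toChars total).toArray)[e1.toNat]?).getD '0'
          = (PySem.List.pyGet? (a.toList ++ PySem.Int.toChars total) e1).getD '0' := by
        rw [getD_sim _ e1 '0' he1, hbd]
        rfl
      have hg2 : ((a ++ (PySem.Int.toChars total).toArray)[e2.toNat]?).getD '0'
          = (PySem.List.pyGet? (a.toList ++ PySem.Int.toChars total) e2).getD '0' := by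
        rw [getD_sim _ e2 '0' he2, hbd]
        rfl
      have hpos : (0 : Int) < (((a.toList ++ PySem.Int.toChars total).length : Nat) : Int) := by
        have := List.length_pos_of_ne_nil (toChars_ne_nil total)
        rw [List.length_append]
        push_cast
        omega
      rw [hg1, hg2, hsz]
      have := ih goal (a ++ (PySem.Int.toChars total).toArray)
        (PySem.Int.mod (e1 + 1 + (PySem.Int.ofChars? [(PySem.List.pyGet? (a.toList ++ PySem.Int.toChars total) e1).getD '0']).getD 0) (((a.toList ++ PySem.Int.toChars total).length : Nat) : Int))
        (PySem.Int.mod (e2 + 1 + (PySem.Int.ofChars? [(PySem.List.pyGet? (a.toList ++ PySem.Int.toChars total) e2).getD '0']).getD 0) (((a.toList ++ PySem.Int.toChars total).length : Nat) : Int))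
        (PySem.Int.mod_nonneg _ hpos) (PySem.Int.mod_nonneg _ hpos)
      rw [hbd] at this
      exact this
    · rw [if_neg hg, if_neg hg]
      exact ⟨rfl, rfl, rfl⟩

-- the elves' indices stay nonnegative along the iteration of stStep
theorem iter_elves_nonneg (k : Nat) (st : List Char × Int × Int)
    (h1 : 0 ≤ st.2.1) (h2 : 0 ≤ st.2.2) :
    0 ≤ (stStep^[k] st).2.1 ∧ 0 ≤ (stStep^[k] st).2.2 := by
  induction k generalizing st with
  | zero => exact ⟨h1, h2⟩
  | succ m ih =>
    rw [Function.iterate_succ_apply]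
    obtain ⟨bd, e1, e2⟩ := st
    have hpos : (0 : Int) < (((bd ++ PySem.Int.toChars (chDigit bd e1 + chDigit bd e2)).length : Nat) : Int) := by
      have := List.length_pos_of_ne_nil (toChars_ne_nil (chDigit bd e1 + chDigit bd e2))
      rw [List.length_append]
      push_cast
      omega
    exact ih _ (PySem.Int.mod_nonneg _ hpos) (PySem.Int.mod_nonneg _ hpos)

theorem loopB_sim (t : List Char) :
    ∀ (outer steps : Nat) (a : Array Char) (e1 e2 : Int), 0 ≤ e1 → 0 ≤ e2 →
    partB_loop t outer steps a e1 e2 = partB_loopL t outer steps a.toList e1 e2 := by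
  intro outer
  induction outer with
  | zero => intros; rfl
  | succ o ih =>
    intro steps a e1 e2 he1 he2
    obtain ⟨hs1, hs2, hs3⟩ := genB_sim steps (2 * a.size) a e1 e2 he1 he2
    obtain ⟨k, _, heqL, _, _⟩ := genB steps (2 * a.toList.length) a.toList e1 e2
    rw [Array.length_toList] at heqL
    rcases hgen : partB_gen steps (2 * a.size) a e1 e2 with ⟨s1, b1, x1, y1⟩
    rw [hgen, heqL] at hs1 hs2 hs3
    simp only at hs1 hs2 hs3
    have hx1 : x1 = (stStep^[k] (a.toList, e1, e2)).2.1 := by rw [← hs3]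
    have hy1 : y1 = (stStep^[k] (a.toList, e1, e2)).2.2 := by rw [← hs3]
    simp only [partB_loop, partB_loopL, Array.length_toList, hgen, heqL]
    rw [hs1, hs2]
    split_ifs with h1 h2
    · rfl
    · rfl
    · have hel := iter_elves_nonneg k (a.toList, e1, e2) he1 he2
      rw [ih (steps - k) b1 x1 y1 (by rw [hx1]; exact hel.1) (by rw [hy1]; exact hel.2),
          hs2, hx1, hy1]

theorem mapd_37 : [3, 7].map dchar = ['3', '7'] := by decide

theorem part2_spec : Claim_unchanged_part2 := by
  unfold Claim_unchanged_part2
  intro target _ hpre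
  intro hnd
  by_cases h7 : target = 7
  · subst h7; decide
  by_cases h37 : target = 37
  · subst h37; decide
  -- general case
  have hpre' : (0 : Int) ≤ target := hpre
  have hnd3 : target ≠ 3 := fun h => hnd h
  set t := PySem.Int.toChars target with htdef
  have ht : 0 < t.length := List.length_pos_of_ne_nil (toChars_ne_nil target)
  have hinj := toChars_eq_digit target hpre'
  have ht3 : t ≠ ['3'] := fun h => hnd3 (hinj.1 h)
  have ht7 : t ≠ ['7'] := fun h => h7 (hinj.2.1 h)
  have ht37 : t ≠ ['3', '7'] := fun h => h37 (hinj.2.2 h)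
  set base : Nat := if t.length = 1 then 1 else 0 with hbase
  have hb1 : base ≤ 1 := by rw [hbase]; split <;> omega
  have hb2 : 2 ≤ t.length → base = 0 := by
    intro h2; rw [hbase, if_neg (by omega)]
  have hinv0 : ∀ j, base ≤ j → ¬ t <+: (([3, 7] : List Int).map dchar).drop j := by
    rw [mapd_37]
    intro j hbj hcon
    match j with
    | 0 =>
      rw [List.drop_zero] at hcon
      have hb0 : base = 0 := by omega
      have hL2 : 2 ≤ t.length := by
        by_contra hL
        have hL1 : t.length = 1 := by omega
        rw [hbase, if_pos hL1] at hb0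
        omega
      have hlen := hcon.length_le
      simp only [List.length_cons, List.length_nil] at hlen
      exact ht37 (hcon.eq_of_length (by simp; omega))
    | 1 =>
      have hd1 : List.drop 1 (['3', '7'] : List Char) = ['7'] := rfl
      rw [hd1] at hcon
      have hlen := hcon.length_le
      simp only [List.length_cons, List.length_nil] at hlen
      exact ht7 (hcon.eq_of_length (by simp; omega))
    | (m + 2) =>
      have hd2 : List.drop (m + 2) (['3', '7'] : List Char) = [] := by simp
      rw [hd2, List.prefix_nil] at hcon
      rw [hcon] at ht
      simp at ht
  have hA : part2 target
      = PySem.Chars.findFrom (stStep^[pvFuel] (([3, 7] : List Int).map dchar, 0, 1)).1 t (base : Int) none := by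
    rw [show part2 target = partA_loop t ((t.length : Nat) : Int) pvFuel #[3, 7] 0 1 from rfl,
        loopA_sim t ht pvFuel #[3, 7] 0 1 (by omega) (by omega) (by decide),
        show (#[3, 7] : Array Int).toList = [3, 7] from rfl]
    exact loopA t ht base hb1 hb2 pvFuel [3, 7] 0 1 (by decide) (by decide) hinv0
  have hB : part2_alt target
      = PySem.Chars.find (stStep^[pvFuel] (['3', '7'], 0, 1)).1 t := by
    rw [show part2_alt target = partB_loop t pvFuel pvFuel #['3', '7'] 0 1 from rfl,
        loopB_sim t pvFuel pvFuel #['3', '7'] 0 1 (by omega) (by omega),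
        show (#['3', '7'] : Array Char).toList = ['3', '7'] from rfl]
    exact loopB t pvFuel pvFuel (['3', '7'], 0, 1) (le_refl _) (by decide)
  rw [hA, hB, mapd_37]
  set bd := (stStep^[pvFuel] ((['3', '7'] : List Char), 0, 1)).1 with hbd
  have hbdpre : (['3', '7'] : List Char) <+: bd := board_iter_prefix pvFuel (['3', '7'], 0, 1)
  have hbdlen : 2 ≤ bd.length := by
    obtain ⟨e, he⟩ := hbdpre
    rw [← he, List.length_append]
    simp
  by_cases hL1 : t.length = 1
  · -- base = 1: no occurrence at index 0 since bd starts with '3' and t ≠ "3"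
    rw [hbase, if_pos hL1]
    have hno0 : ¬ t <+: bd.drop 0 := by
      rw [List.drop_zero]
      intro hcon
      apply ht3
      obtain ⟨c, hc⟩ : ∃ c, t = [c] := by
        first
          | exact List.length_eq_one.mp hL1
          | exact List.length_eq_one_iff.mp hL1
      obtain ⟨e, he⟩ := hbdpre
      rw [hc, ← he] at hcon
      have hsh : ((['3', '7'] : List Char) ++ e) = '3' :: ('7' :: e) := rfl
      rw [hsh] at hcon
      have hc3 : c = '3' := (List.cons_prefix_cons.mp hcon).1
      rw [hc, hc3]
    by_cases hne : PySem.Chars.find bd t = -1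
    · rw [hne]
      exact findFrom_neg_one_of 1 (by omega) (by
        intro j hj hcon
        rcases Nat.eq_zero_or_pos j with h | h
        · omega
        · have : PySem.Chars.find bd t ≠ -1 := by
            rw [PySem.Chars.find_ne_neg_one_iff, ← occ_exists_iff_infix]
            exact ⟨j, hcon⟩
          exact this hne)
    · have hge : 0 ≤ PySem.Chars.find bd t := by
        have := PySem.Chars.neg_one_le_find bd t; omega
      obtain ⟨hocc, hmin⟩ := PySem.Chars.find_spec hge
      have hj1 : 1 ≤ (PySem.Chars.find bd t).toNat := by
        rcases Nat.eq_zero_or_pos (PySem.Chars.find bd t).toNat with h | h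
        · rw [h] at hocc
          exact absurd (by simpa using hocc) hno0
        · omega
      rw [findFrom_eq_of 1 (PySem.Chars.find bd t).toNat (by omega) hj1 hocc
        (fun i _ hij => hmin i hij)]
      omega
  · rw [hbase, if_neg hL1]
    rw [show ((0 : Nat) : Int) = (0 : Int) from rfl, PySem.Chars.findFrom_zero]

-- the two witness computations, carried out on the list models via the simulation lemmas
set_option maxHeartbeats 1600000 in
theorem part2_at3 : part2 3 = 52 := by
  rw [show part2 3 = partA_loop (PySem.Int.toChars 3) (((PySem.Int.toChars 3).length : Nat) : Int) pvFuel #[3, 7] 0 1 from rfl,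
      loopA_sim (PySem.Int.toChars 3) (by decide) pvFuel #[3, 7] 0 1 (by omega) (by omega) (by decide),
      show (#[3, 7] : Array Int).toList = [3, 7] from rfl]
  decide

set_option maxHeartbeats 1600000 in
theorem part2_alt_at3 : part2_alt 3 = 0 := by
  rw [show part2_alt 3 = partB_loop (PySem.Int.toChars 3) pvFuel pvFuel #['3', '7'] 0 1 from rfl,
      loopB_sim (PySem.Int.toChars 3) pvFuel pvFuel #['3', '7'] 0 1 (by omega) (by omega),
      show (#['3', '7'] : Array Char).toList = ['3', '7'] from rfl]
  decide

theorem part2_changed : Claim_changed_part2 := by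
  unfold Claim_changed_part2
  exact ⟨by decide, by decide, by decide, part2_at3, part2_alt_at3, by decide⟩

theorem part2_tight : Claim_exact_part2 := by
  unfold Claim_exact_part2
  intro target _ _ hD
  have h3 : target = 3 := hD
  subst h3
  rw [part2_at3, part2_alt_at3]
  decide
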